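-- pv_equiv track=rewrite | github.com/Fabian1567/SpacerPlacer_IntegronEvo | model/mafft_integration.py | rename_spacers_for_mafft
-- ===== SOURCE A (Python) =====
-- def rename_spacers_for_mafft(ls_arrays):
--     dict_renaming = {}
--     dict_reversed_renaming = {}
--     new_name = 1
--     renamed_ls_arrays = []
--     for i, array in enumerate(ls_arrays):
--         new_array = []
--         for sp in array:
--             if sp not in dict_renaming:
--                 dict_renaming[sp] = new_name
--                 dict_reversed_renaming[str(new_name)] = str(sp)
--                 new_name += 1
--             new_array.append(dict_renaming[sp])
--         renamed_ls_arrays.append(new_array)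
--     return renamed_ls_arrays, dict_renaming, dict_reversed_renaming
-- ===== SOURCE B (Python) =====
-- def rename_spacers_for_mafft(ls_arrays):
--     flat = [sp for array in ls_arrays for sp in array]
--     order = list(dict.fromkeys(flat))
--     dict_renaming = {sp: i + 1 for i, sp in enumerate(order)}
--     dict_reversed_renaming = {str(i + 1): str(sp) for i, sp in enumerate(order)}
--     renamed_ls_arrays = [[dict_renaming[sp] for sp in array] for array in ls_arrays]
--     return renamed_ls_arrays, dict_renaming, dict_reversed_renaming
-- ===== Notes on version B (the rewrite author's own statement) =====
-- stated objective: idiomatic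
-- what changed: A's fused scan with a mutable counter and membership test is replaced by flattening all arrays, deduplicating with dict.fromkeys to get the first-appearance order, building both maps by enumerate-comprehensions, and remapping the arrays with a nested comprehension.
import Mathlib
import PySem

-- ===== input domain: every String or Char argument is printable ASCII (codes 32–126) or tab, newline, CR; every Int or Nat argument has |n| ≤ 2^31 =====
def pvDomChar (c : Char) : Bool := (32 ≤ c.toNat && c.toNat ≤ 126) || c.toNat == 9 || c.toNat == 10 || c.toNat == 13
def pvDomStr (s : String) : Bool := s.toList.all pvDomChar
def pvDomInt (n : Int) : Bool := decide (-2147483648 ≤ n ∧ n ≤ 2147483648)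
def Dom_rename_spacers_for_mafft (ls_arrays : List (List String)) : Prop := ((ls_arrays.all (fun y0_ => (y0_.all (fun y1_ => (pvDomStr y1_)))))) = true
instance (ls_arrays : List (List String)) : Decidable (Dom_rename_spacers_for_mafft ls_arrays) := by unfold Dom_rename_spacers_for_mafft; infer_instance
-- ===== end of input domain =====

-- B replaces A's fused counter loop by flatten + dict.fromkeys dedup + enumerate comprehensions (same cost, idiomatic decomposition).


-- ===== PORT A =====
-- A's inner loop body: possibly register sp in both maps, then append dict_renaming[sp].
def pvStepA (st : PySem.Dict String Int × PySem.Dict String String × Int × List Int) (sp : String) :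
    PySem.Dict String Int × PySem.Dict String String × Int × List Int :=
  if st.1.contains sp then
    (st.1, st.2.1, st.2.2.1, st.2.2.2 ++ [st.1.getD sp 0])
  else
    (st.1.insert sp st.2.2.1, st.2.1.insert (PySem.Int.toStr st.2.2.1) sp, st.2.2.1 + 1,
     st.2.2.2 ++ [(st.1.insert sp st.2.2.1).getD sp 0])

-- A's outer loop body: run the inner loop with a fresh new_array, append it to renamed_ls_arrays.
def pvOuterA (st : PySem.Dict String Int × PySem.Dict String String × Int × List (List Int))
    (array : List String) :
    PySem.Dict String Int × PySem.Dict String String × Int × List (List Int) :=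
  let inner := array.foldl pvStepA (st.1, st.2.1, st.2.2.1, [])
  (inner.1, inner.2.1, inner.2.2.1, st.2.2.2 ++ [inner.2.2.2])

def rename_spacers_for_mafft (ls_arrays : List (List String)) :
    List (List Int) × (List (String × Int)) × (List (String × String)) :=
  let fin := ls_arrays.foldl pvOuterA (PySem.Dict.empty, PySem.Dict.empty, 1, [])
  (fin.2.2.2, fin.1.items, fin.2.1.items)

-- ===== PORT B =====
-- flat = [sp for array in ls_arrays for sp in array]; order = list(dict.fromkeys(flat));
-- both maps are dict comprehensions over enumerate(order); renamed arrays by a nested comprehension.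
def rename_spacers_for_mafft_alt (ls_arrays : List (List String)) :
    List (List Int) × (List (String × Int)) × (List (String × String)) :=
  let flat := ls_arrays.flatMap (fun array => array)
  let order := PySem.List.dedup flat
  let dict_renaming :=
    (PySem.List.enumerate order).foldl (fun d p => d.insert p.2 (p.1 + 1)) PySem.Dict.empty
  let dict_reversed_renaming :=
    (PySem.List.enumerate order).foldl (fun d p => d.insert (PySem.Int.toStr (p.1 + 1)) p.2) PySem.Dict.empty
  (ls_arrays.map (fun array => array.map (fun sp => dict_renaming.getD sp 0)),
   dict_renaming.items, dict_reversed_renaming.items)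

-- ===== PRECONDITION & SPEC =====
def Spec_rename_spacers_for_mafft (ls_arrays : List (List String)) (out : List (List Int) × (List (String × Int)) × (List (String × String))) : Prop := out = rename_spacers_for_mafft_alt ls_arrays
instance (ls_arrays : List (List String)) (out : List (List Int) × (List (String × Int)) × (List (String × String))) : Decidable (Spec_rename_spacers_for_mafft ls_arrays out) := by unfold Spec_rename_spacers_for_mafft; infer_instance

-- ===== CLAIM (what is proved, stated in full; the proofs are below) =====
def Claim_equal_rename_spacers_for_mafft : Prop := ∀ (ls_arrays : List (List String)), Dom_rename_spacers_for_mafft ls_arrays → Spec_rename_spacers_for_mafft ls_arrays (rename_spacers_for_mafft ls_arrays)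

-- ===== LEMMAS AND PROOFS =====

-- Proof-side map-building step (A's registration without the array output).
def pvStepB (st : PySem.Dict String Int × PySem.Dict String String × Int) (sp : String) :
    PySem.Dict String Int × PySem.Dict String String × Int :=
  if st.1.contains sp then st
  else (st.1.insert sp st.2.2, st.2.1.insert (PySem.Int.toStr st.2.2) sp, st.2.2 + 1)

def pvBuildB (st : PySem.Dict String Int × PySem.Dict String String × Int) (array : List String) :
    PySem.Dict String Int × PySem.Dict String String × Int :=
  array.foldl pvStepB st

-- B's two comprehension-built dicts, as functions of the first-appearance list.
def pvRmap (seen : List String) : PySem.Dict String Int :=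
  (PySem.List.enumerate seen).foldl (fun d p => d.insert p.2 (p.1 + 1)) PySem.Dict.empty

def pvVmap (seen : List String) : PySem.Dict String String :=
  (PySem.List.enumerate seen).foldl (fun d p => d.insert (PySem.Int.toStr (p.1 + 1)) p.2) PySem.Dict.empty

-- The rename dict only grows: a key already bound keeps its value through the registration fold.
theorem pv_mono_fold (l : List String) (st : PySem.Dict String Int × PySem.Dict String String × Int)
    (k : String) (h : (st.1.get? k).isSome) :
    ((l.foldl pvStepB st).1.get? k) = st.1.get? k := by
  induction l generalizing st with
  | nil => rfl
  | cons sp l ih =>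
    simp only [List.foldl_cons]
    have hstep : (pvStepB st sp).1.get? k = st.1.get? k := by
      unfold pvStepB
      by_cases hc : st.1.contains sp = true
      · simp [hc]
      · simp only [Bool.not_eq_true] at hc
        rw [if_neg (by simp [hc])]
        by_cases hk : k = sp
        · subst hk
          rw [PySem.Dict.contains_eq_isSome_get?] at hc
          rw [hc] at h; exact absurd h (by simp)
        · simp only [PySem.Dict.get?_insert]
          rw [if_neg hk]
    rw [ih (pvStepB st sp) (by rw [hstep]; exact h), hstep]

-- ... and through the outer fold over all arrays.
theorem pv_mono_outer (ls : List (List String))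
    (st : PySem.Dict String Int × PySem.Dict String String × Int)
    (k : String) (h : (st.1.get? k).isSome) :
    ((ls.foldl pvBuildB st).1.get? k) = st.1.get? k := by
  induction ls generalizing st with
  | nil => rfl
  | cons arr ls ih =>
    simp only [List.foldl_cons]
    have h1 : (pvBuildB st arr).1.get? k = st.1.get? k := pv_mono_fold arr st k h
    rw [ih (pvBuildB st arr) (by rw [h1]; exact h), h1]

-- Every spacer of the processed array is bound afterwards.
theorem pv_present (l : List String) (st : PySem.Dict String Int × PySem.Dict String String × Int)
    (sp : String) (h : sp ∈ l) : ((l.foldl pvStepB st).1.get? sp).isSome := by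
  induction l generalizing st with
  | nil => cases h
  | cons a l ih =>
    simp only [List.foldl_cons]
    rcases List.mem_cons.mp h with rfl | hmem
    · have hsome : ((pvStepB st sp).1.get? sp).isSome := by
        unfold pvStepB
        by_cases hc : st.1.contains sp = true
        · simp only [hc]
          rw [PySem.Dict.contains_eq_isSome_get?] at hc; exact hc
        · simp only [Bool.not_eq_true] at hc
          simp [hc, PySem.Dict.get?_insert_self]
      rw [pv_mono_fold l _ sp hsome]; exact hsome
    · exact ih _ hmem

-- A's fused inner loop equals the registration loop plus a deferred map over the array.
theorem pv_inner_eq (l : List String)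
    (st : PySem.Dict String Int × PySem.Dict String String × Int) (acc : List Int) :
    l.foldl pvStepA (st.1, st.2.1, st.2.2, acc) =
      ((l.foldl pvStepB st).1, (l.foldl pvStepB st).2.1, (l.foldl pvStepB st).2.2,
       acc ++ l.map (fun sp => (l.foldl pvStepB st).1.getD sp 0)) := by
  induction l generalizing st acc with
  | nil => simp
  | cons sp l ih =>
    simp only [List.foldl_cons, List.map_cons]
    by_cases hc : st.1.contains sp = true
    · have hsome : (st.1.get? sp).isSome := by
        rw [PySem.Dict.contains_eq_isSome_get?] at hc; exact hc
      have hstepA : pvStepA (st.1, st.2.1, st.2.2, acc) sp =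
          (st.1, st.2.1, st.2.2, acc ++ [st.1.getD sp 0]) := by
        unfold pvStepA; simp [hc]
      have hstepB : pvStepB st sp = st := by unfold pvStepB; simp [hc]
      rw [hstepA, hstepB]
      have := ih st (acc ++ [st.1.getD sp 0])
      rw [this]
      have hval : st.1.getD sp 0 = (l.foldl pvStepB st).1.getD sp 0 := by
        rw [PySem.Dict.getD_eq_get?_getD, PySem.Dict.getD_eq_get?_getD, pv_mono_fold l st sp hsome]
      rw [hval]; simp
    · simp only [Bool.not_eq_true] at hc
      have hstepA : pvStepA (st.1, st.2.1, st.2.2, acc) sp =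
          (st.1.insert sp st.2.2, st.2.1.insert (PySem.Int.toStr st.2.2) sp, st.2.2 + 1,
           acc ++ [(st.1.insert sp st.2.2).getD sp 0]) := by
        unfold pvStepA; simp [hc]
      have hstepB : pvStepB st sp =
          (st.1.insert sp st.2.2, st.2.1.insert (PySem.Int.toStr st.2.2) sp, st.2.2 + 1) := by
        unfold pvStepB; simp [hc]
      rw [hstepA, hstepB]
      have := ih (st.1.insert sp st.2.2, st.2.1.insert (PySem.Int.toStr st.2.2) sp, st.2.2 + 1)
        (acc ++ [(st.1.insert sp st.2.2).getD sp 0])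
      simp only at this
      rw [this]
      have hsome : ((st.1.insert sp st.2.2).get? sp).isSome := by
        rw [PySem.Dict.get?_insert_self]; rfl
      have hval : (st.1.insert sp st.2.2).getD sp 0 =
          (l.foldl pvStepB (st.1.insert sp st.2.2, st.2.1.insert (PySem.Int.toStr st.2.2) sp, st.2.2 + 1)).1.getD sp 0 := by
        rw [PySem.Dict.getD_eq_get?_getD, PySem.Dict.getD_eq_get?_getD,
          pv_mono_fold l _ sp hsome]
      rw [hval]; simp

-- A's fused outer loop equals the full registration fold plus deferred nested mapping.
theorem pv_outer_eq (ls : List (List String))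
    (st : PySem.Dict String Int × PySem.Dict String String × Int) (accR : List (List Int)) :
    ls.foldl pvOuterA (st.1, st.2.1, st.2.2, accR) =
      ((ls.foldl pvBuildB st).1, (ls.foldl pvBuildB st).2.1, (ls.foldl pvBuildB st).2.2,
       accR ++ ls.map (fun arr => arr.map (fun sp => (ls.foldl pvBuildB st).1.getD sp 0))) := by
  induction ls generalizing st accR with
  | nil => simp
  | cons arr ls ih =>
    simp only [List.foldl_cons, List.map_cons]
    have houter : pvOuterA (st.1, st.2.1, st.2.2, accR) arr =
        ((pvBuildB st arr).1, (pvBuildB st arr).2.1, (pvBuildB st arr).2.2,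
         accR ++ [arr.map (fun sp => (pvBuildB st arr).1.getD sp 0)]) := by
      unfold pvOuterA
      rw [pv_inner_eq arr st []]
      simp [pvBuildB]
    rw [houter]
    have := ih (pvBuildB st arr) (accR ++ [arr.map (fun sp => (pvBuildB st arr).1.getD sp 0)])
    rw [this]
    have hmaps : arr.map (fun sp => (pvBuildB st arr).1.getD sp 0) =
        arr.map (fun sp => (ls.foldl pvBuildB (pvBuildB st arr)).1.getD sp 0) := by
      apply List.map_congr_left
      intro sp hsp
      have hsome : ((pvBuildB st arr).1.get? sp).isSome := pv_present arr st sp hsp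
      rw [PySem.Dict.getD_eq_get?_getD, PySem.Dict.getD_eq_get?_getD,
        pv_mono_outer ls (pvBuildB st arr) sp hsome]
    rw [hmaps]; simp

-- The nested registration fold is the flat registration fold over the flattened stream.
theorem pv_flatten_fold (ls : List (List String))
    (st : PySem.Dict String Int × PySem.Dict String String × Int) :
    ls.foldl pvBuildB st = ls.flatten.foldl pvStepB st := by
  induction ls generalizing st with
  | nil => rfl
  | cons arr ls ih => simp only [List.foldl_cons, List.flatten_cons, List.foldl_append]; exact ih _

-- The comprehension dicts over seen ++ [sp] extend those over seen by one insert.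
theorem pv_Rmap_snoc (seen : List String) (sp : String) :
    pvRmap (seen ++ [sp]) = (pvRmap seen).insert sp ((seen.length : Int) + 1) := by
  unfold pvRmap
  rw [PySem.List.enumerate_append, List.foldl_append]
  simp [PySem.List.enumerate]

theorem pv_Vmap_snoc (seen : List String) (sp : String) :
    pvVmap (seen ++ [sp]) = (pvVmap seen).insert (PySem.Int.toStr ((seen.length : Int) + 1)) sp := by
  unfold pvVmap
  rw [PySem.List.enumerate_append, List.foldl_append]
  simp [PySem.List.enumerate]

-- Membership in the comprehension dict is membership in the first-appearance list.
theorem pv_Rmap_contains (seen : List String) (sp : String) :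
    (pvRmap seen).contains sp = decide (sp ∈ seen) := by
  rw [PySem.Dict.contains_eq_decide_mem_keys]
  have h : sp ∈ (pvRmap seen).keys ↔ sp ∈ seen := by
    induction seen using List.reverseRecOn with
    | nil => simp [pvRmap, PySem.List.enumerate]
    | append_singleton seen x ih =>
      rw [pv_Rmap_snoc]
      simp [PySem.Dict.mem_keys_insert, ih]
      tauto
  simp [h]

-- Invariant: the registration fold from the canonical state of `seen` lands in the
-- canonical state of seen updated (set-wise) with the stream.
theorem pv_build_eq_maps (f : List String) (seen : List String) :
    f.foldl pvStepB (pvRmap seen, pvVmap seen, (seen.length : Int) + 1) =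
      (pvRmap (PySem.Set.update seen f), pvVmap (PySem.Set.update seen f),
       ((PySem.Set.update seen f).length : Int) + 1) := by
  induction f generalizing seen with
  | nil => simp [PySem.Set.update]
  | cons sp f ih =>
    simp only [List.foldl_cons]
    by_cases hm : sp ∈ seen
    · have hstep : pvStepB (pvRmap seen, pvVmap seen, (seen.length : Int) + 1) sp =
          (pvRmap seen, pvVmap seen, (seen.length : Int) + 1) := by
        unfold pvStepB; simp [pv_Rmap_contains, hm]
      have hupd : PySem.Set.update seen (sp :: f) = PySem.Set.update seen f := by
        simp [PySem.Set.update, PySem.Set.add, hm]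
      rw [hstep, hupd]; exact ih seen
    · have hstep : pvStepB (pvRmap seen, pvVmap seen, (seen.length : Int) + 1) sp =
          (pvRmap (seen ++ [sp]), pvVmap (seen ++ [sp]), ((seen ++ [sp]).length : Int) + 1) := by
        unfold pvStepB
        rw [if_neg (by simp [pv_Rmap_contains, hm])]
        rw [pv_Rmap_snoc, pv_Vmap_snoc]
        simp
      have hupd : PySem.Set.update seen (sp :: f) = PySem.Set.update (seen ++ [sp]) f := by
        simp [PySem.Set.update, PySem.Set.add, hm]
      rw [hstep, hupd]; exact ih (seen ++ [sp])

-- ===== VERDICT (by name: the statement is the Claim_ definition above) =====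
theorem rename_spacers_for_mafft_spec : Claim_equal_rename_spacers_for_mafft := by
  intro ls_arrays _
  unfold Spec_rename_spacers_for_mafft rename_spacers_for_mafft rename_spacers_for_mafft_alt
  rw [show ((PySem.Dict.empty : PySem.Dict String Int), (PySem.Dict.empty : PySem.Dict String String), (1 : Int), ([] : List (List Int))) =
    (((PySem.Dict.empty : PySem.Dict String Int), (PySem.Dict.empty : PySem.Dict String String), (1 : Int)).1,
     ((PySem.Dict.empty : PySem.Dict String Int), (PySem.Dict.empty : PySem.Dict String String), (1 : Int)).2.1,
     ((PySem.Dict.empty : PySem.Dict String Int), (PySem.Dict.empty : PySem.Dict String String), (1 : Int)).2.2,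
     ([] : List (List Int))) from rfl]
  rw [pv_outer_eq ls_arrays (PySem.Dict.empty, PySem.Dict.empty, 1) []]
  rw [pv_flatten_fold]
  have hinit : ((PySem.Dict.empty : PySem.Dict String Int),
      (PySem.Dict.empty : PySem.Dict String String), (1 : Int)) =
      (pvRmap [], pvVmap [], ((List.length ([] : List String) : Int) + 1)) := by
    simp [pvRmap, pvVmap, PySem.List.enumerate]
  rw [hinit, pv_build_eq_maps]
  have hflat : ls_arrays.flatten = ls_arrays.flatMap (fun array => array) := by
    simp [List.flatMap_def]
  have hded : PySem.Set.update ([] : List String) ls_arrays.flatten =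
      PySem.List.dedup (ls_arrays.flatMap (fun array => array)) := by
    rw [PySem.List.dedup_eq_ofList, ← hflat]; rfl
  rw [hded]
  simp [pvRmap, pvVmap]
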